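-- pv_equiv track=rewrite | github.com/eloyhz/competitive-programming | codeforces/training/cf6_d2_b_presidents_office.py | solve_editorial
-- ===== SOURCE A (Python) =====
-- def solve_editorial(room, n, m, c):
--     adj = set()
--     for i in range(n):
--         for j in range(m):
--             if room[i][j] != c:
--                 continue
--             if i > 0 and room[i - 1][j] != c:
--                 adj.add(room[i - 1][j])
--             if i < n - 1 and room[i + 1][j] != c:
--                 adj.add(room[i + 1][j])
--             if j > 0 and room[i][j - 1] != c:
--                 adj.add(room[i][j - 1])
--             if j < m - 1 and room[i][j + 1] != c:
--                 adj.add(room[i][j + 1])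
--     return len(adj) if '.' not in adj else len(adj) - 1
-- ===== SOURCE B (Python) =====
-- def solve_editorial(room, n, m, c):
--     # Color-centred two-stage search: collect the palette of all cell values,
--     # then count the colors (other than c and '.') that touch a c-cell somewhere.
--     def neighbors_c(i, j):
--         return any(room[p][q] == c
--                    for p, q in ((i - 1, j), (i + 1, j), (i, j - 1), (i, j + 1))
--                    if 0 <= p < n and 0 <= q < m)
--
--     def touches(x):
--         return any(room[i][j] == x and neighbors_c(i, j)
--                    for i in range(n) for j in range(m))
--
--     palette = {room[i][j] for i in range(n) for j in range(m)}
--     return sum(1 for x in palette if x != c and x != '.' and touches(x))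
-- ===== Notes on version B (the rewrite author's own statement) =====
-- stated objective: alternative
-- what changed: Replaced the cell-centred scan (for each c-cell, probe its four neighbours into a set, then subtract one if '.' slipped in) by a colour-centred two-stage search: first build the palette of all distinct cell values, then count the colours other than c and '.' for which a per-colour grid scan finds a cell of that colour adjacent to a c-cell.
import Mathlib
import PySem

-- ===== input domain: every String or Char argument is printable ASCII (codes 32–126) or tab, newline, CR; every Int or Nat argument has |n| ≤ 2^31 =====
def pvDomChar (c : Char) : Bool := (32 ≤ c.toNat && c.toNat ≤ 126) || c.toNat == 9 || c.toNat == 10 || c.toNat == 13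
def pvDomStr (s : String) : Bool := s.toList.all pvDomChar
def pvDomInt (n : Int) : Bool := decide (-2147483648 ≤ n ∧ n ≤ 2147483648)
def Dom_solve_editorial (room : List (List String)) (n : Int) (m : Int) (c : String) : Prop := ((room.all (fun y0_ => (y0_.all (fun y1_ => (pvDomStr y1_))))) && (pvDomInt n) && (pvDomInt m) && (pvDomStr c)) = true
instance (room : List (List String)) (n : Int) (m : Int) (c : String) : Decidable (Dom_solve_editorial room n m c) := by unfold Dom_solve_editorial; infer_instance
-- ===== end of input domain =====

-- B replaces A's cell-centred neighbour-set accumulation by a two-stage colour-centred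
-- search: build the palette of all cell values, then count the colours (≠ c, ≠ '.')
-- that touch a c-cell somewhere — an alternative decomposition, not tuned for speed.

-- room[i][j], total form (used by both ports; exact under Pre_, where every access is in range)
def pvCell (room : List (List String)) (i j : Int) : String :=
  PySem.List.pyGetD (PySem.List.pyGetD room i []) j ""

-- ===== PORT A =====
def solve_editorial (room : List (List String)) (n : Int) (m : Int) (c : String) : Int :=
  let adj : PySem.Set String :=
    (PySem.List.pyRange 0 n 1).foldl (fun adj i =>
      (PySem.List.pyRange 0 m 1).foldl (fun adj j =>
        if pvCell room i j ≠ c then adj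
        else
          let adj := if 0 < i ∧ pvCell room (i-1) j ≠ c then PySem.Set.add adj (pvCell room (i-1) j) else adj
          let adj := if i < n - 1 ∧ pvCell room (i+1) j ≠ c then PySem.Set.add adj (pvCell room (i+1) j) else adj
          let adj := if 0 < j ∧ pvCell room i (j-1) ≠ c then PySem.Set.add adj (pvCell room i (j-1)) else adj
          if j < m - 1 ∧ pvCell room i (j+1) ≠ c then PySem.Set.add adj (pvCell room i (j+1)) else adj)
        adj)
      PySem.Set.empty
  if "." ∈ adj then (adj.length : Int) - 1 else (adj.length : Int)

-- ===== PORT B =====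
-- helper neighbors_c(i, j) of Source B: does some in-bounds neighbour of (i,j) equal c?
def pvNeighborsC (room : List (List String)) (n m : Int) (c : String) (i j : Int) : Bool :=
  (([(i-1, j), (i+1, j), (i, j-1), (i, j+1)].filter
      (fun pq => decide (0 ≤ pq.1 ∧ pq.1 < n ∧ 0 ≤ pq.2 ∧ pq.2 < m))).any
    (fun pq => pvCell room pq.1 pq.2 == c))

-- helper touches(x) of Source B: does some cell with value x have a c-neighbour?
def pvTouches (room : List (List String)) (n m : Int) (c : String) (x : String) : Bool :=
  (PySem.List.pyRange 0 n 1).any fun i =>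
    (PySem.List.pyRange 0 m 1).any fun j =>
      pvCell room i j == x && pvNeighborsC room n m c i j

def solve_editorial_alt (room : List (List String)) (n : Int) (m : Int) (c : String) : Int :=
  let palette : PySem.Set String :=
    (PySem.List.pyRange 0 n 1).foldl (fun s i =>
      (PySem.List.pyRange 0 m 1).foldl (fun s j => PySem.Set.add s (pvCell room i j)) s)
      PySem.Set.empty
  ((palette.countP (fun x => !(x == c) && !(x == ".") && pvTouches room n m c x) : Nat) : Int)

-- ===== PRECONDITION & SPEC =====
-- Pre_ excludes exactly the inputs where A raises IndexError: when the column loop is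
-- non-empty (0 < m), every row index below n and every column index below m must be in range.
def Pre_solve_editorial (room : List (List String)) (n : Int) (m : Int) (c : String) : Prop :=
  0 < m → (n ≤ (room.length : Int) ∧ ∀ row ∈ room.take n.toNat, m ≤ (row.length : Int))
instance (room : List (List String)) (n : Int) (m : Int) (c : String) : Decidable (Pre_solve_editorial room n m c) := by unfold Pre_solve_editorial; infer_instance
def pvWitness_solve_editorial : List (List String) × Int × Int × String :=
  ([[".", "B"], ["R", "R"]], 2, 2, "R")

def Spec_solve_editorial (room : List (List String)) (n : Int) (m : Int) (c : String) (out : Int) : Prop := out = solve_editorial_alt room n m c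
instance (room : List (List String)) (n : Int) (m : Int) (c : String) (out : Int) : Decidable (Spec_solve_editorial room n m c out) := by unfold Spec_solve_editorial; infer_instance

-- ===== CLAIM (what is proved, stated in full; the proofs are below) =====
def Claim_equal_solve_editorial : Prop := ∀ (room : List (List String)) (n : Int) (m : Int) (c : String), Dom_solve_editorial room n m c → Pre_solve_editorial room n m c → Spec_solve_editorial room n m c (solve_editorial room n m c)

-- ===== LEMMAS AND PROOFS =====

-- generic: membership in a fold that only (conditionally) inserts elements
theorem pv_foldl_mem_iff {α β : Type} (F : List β → α → List β) (Q : α → β → Prop)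
    (hF : ∀ s i y, y ∈ F s i ↔ y ∈ s ∨ Q i y) :
    ∀ (l : List α) (s : List β) (y : β), y ∈ l.foldl F s ↔ y ∈ s ∨ ∃ i ∈ l, Q i y := by
  intro l
  induction l with
  | nil => simp
  | cons a l ih =>
    intro s y
    simp only [List.foldl_cons, ih, hF, List.mem_cons]
    constructor
    · rintro (⟨h | h⟩ | ⟨i, hi, hq⟩)
      · exact Or.inl h
      · exact Or.inr ⟨a, Or.inl rfl, h⟩
      · exact Or.inr ⟨i, Or.inr hi, hq⟩
    · rintro (h | ⟨i, hi | hi, hq⟩)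
      · exact Or.inl (Or.inl h)
      · exact Or.inl (Or.inr (hi ▸ hq))
      · exact Or.inr ⟨i, hi, hq⟩

theorem pv_foldl_nodup {α β : Type} (F : List β → α → List β)
    (hF : ∀ s i, s.Nodup → (F s i).Nodup) :
    ∀ (l : List α) (s : List β), s.Nodup → (l.foldl F s).Nodup := by
  intro l
  induction l with
  | nil => intro s hs; simpa using hs
  | cons a l ih => intro s hs; exact ih _ (hF s a hs)

-- the per-cell predicate of A: y is a non-c neighbour value of the c-cell (i,j)
def pvQA (room : List (List String)) (n m : Int) (c : String) (i j : Int) (y : String) : Prop :=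
  pvCell room i j = c ∧
    ((0 < i ∧ pvCell room (i-1) j ≠ c ∧ y = pvCell room (i-1) j) ∨
     (i < n - 1 ∧ pvCell room (i+1) j ≠ c ∧ y = pvCell room (i+1) j) ∨
     (0 < j ∧ pvCell room i (j-1) ≠ c ∧ y = pvCell room i (j-1)) ∨
     (j < m - 1 ∧ pvCell room i (j+1) ≠ c ∧ y = pvCell room i (j+1)))

theorem pv_mem_condAdd {P : Prop} [inst : Decidable P] (s : List String) (v y : String) :
    (y ∈ (if P then PySem.Set.add s v else s)) ↔ y ∈ s ∨ (P ∧ y = v) := by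
  split_ifs with h <;> simp [PySem.Set.mem_add, h]

theorem pvA_step_mem (room : List (List String)) (n m : Int) (c : String) (i : Int)
    (s : List String) (j : Int) (y : String) :
    (y ∈ (fun adj j =>
        if pvCell room i j ≠ c then adj
        else
          let adj := if 0 < i ∧ pvCell room (i-1) j ≠ c then PySem.Set.add adj (pvCell room (i-1) j) else adj
          let adj := if i < n - 1 ∧ pvCell room (i+1) j ≠ c then PySem.Set.add adj (pvCell room (i+1) j) else adj
          let adj := if 0 < j ∧ pvCell room i (j-1) ≠ c then PySem.Set.add adj (pvCell room i (j-1)) else adj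
          if j < m - 1 ∧ pvCell room i (j+1) ≠ c then PySem.Set.add adj (pvCell room i (j+1)) else adj) s j)
      ↔ y ∈ s ∨ pvQA room n m c i j y := by
  beta_reduce
  simp only [ne_eq]
  by_cases hc : pvCell room i j = c
  · rw [if_neg (not_not_intro hc)]
    simp only [pv_mem_condAdd]
    simp only [pvQA, hc]
    tauto
  · rw [if_pos hc]
    simp [pvQA, hc]

-- membership in A's set
theorem pvA_mem (room : List (List String)) (n m : Int) (c : String) (y : String) :
    (y ∈ (PySem.List.pyRange 0 n 1).foldl (fun adj i =>
      (PySem.List.pyRange 0 m 1).foldl (fun adj j =>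
        if pvCell room i j ≠ c then adj
        else
          let adj := if 0 < i ∧ pvCell room (i-1) j ≠ c then PySem.Set.add adj (pvCell room (i-1) j) else adj
          let adj := if i < n - 1 ∧ pvCell room (i+1) j ≠ c then PySem.Set.add adj (pvCell room (i+1) j) else adj
          let adj := if 0 < j ∧ pvCell room i (j-1) ≠ c then PySem.Set.add adj (pvCell room i (j-1)) else adj
          if j < m - 1 ∧ pvCell room i (j+1) ≠ c then PySem.Set.add adj (pvCell room i (j+1)) else adj)
        adj) PySem.Set.empty)
      ↔ ∃ i, (0 ≤ i ∧ i < n) ∧ ∃ j, (0 ≤ j ∧ j < m) ∧ pvQA room n m c i j y := by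
  rw [pv_foldl_mem_iff _ (fun i y => ∃ j ∈ PySem.List.pyRange 0 m 1, pvQA room n m c i j y)
      (fun s i y => pv_foldl_mem_iff _ (pvQA room n m c i) (pvA_step_mem room n m c i) _ s y)]
  simp [PySem.Set.empty, PySem.List.mem_pyRange_one]

-- A's set is duplicate-free
theorem pvA_nodup (room : List (List String)) (n m : Int) (c : String) :
    ((PySem.List.pyRange 0 n 1).foldl (fun adj i =>
      (PySem.List.pyRange 0 m 1).foldl (fun adj j =>
        if pvCell room i j ≠ c then adj
        else
          let adj := if 0 < i ∧ pvCell room (i-1) j ≠ c then PySem.Set.add adj (pvCell room (i-1) j) else adj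
          let adj := if i < n - 1 ∧ pvCell room (i+1) j ≠ c then PySem.Set.add adj (pvCell room (i+1) j) else adj
          let adj := if 0 < j ∧ pvCell room i (j-1) ≠ c then PySem.Set.add adj (pvCell room i (j-1)) else adj
          if j < m - 1 ∧ pvCell room i (j+1) ≠ c then PySem.Set.add adj (pvCell room i (j+1)) else adj)
        adj) PySem.Set.empty : List String).Nodup := by
  apply pv_foldl_nodup
  · intro s i hs
    apply pv_foldl_nodup
    · intro s j hs
      dsimp only
      split_ifs <;> (repeat apply PySem.Set.nodup_add) <;> exact hs
    · exact hs
  · exact List.nodup_nil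

-- membership in B's palette
theorem pvPal_mem (room : List (List String)) (n m : Int) (y : String) :
    (y ∈ (PySem.List.pyRange 0 n 1).foldl (fun s i =>
      (PySem.List.pyRange 0 m 1).foldl (fun s j => PySem.Set.add s (pvCell room i j)) s)
      PySem.Set.empty)
      ↔ ∃ i, (0 ≤ i ∧ i < n) ∧ ∃ j, (0 ≤ j ∧ j < m) ∧ y = pvCell room i j := by
  rw [pv_foldl_mem_iff _ (fun i y => ∃ j ∈ PySem.List.pyRange 0 m 1, y = pvCell room i j)
      (fun s i y => pv_foldl_mem_iff _ (fun j y => y = pvCell room i j)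
        (fun s j y => by simp [PySem.Set.mem_add]) _ s y)]
  simp [PySem.Set.empty, PySem.List.mem_pyRange_one]

-- B's palette is duplicate-free
theorem pvPal_nodup (room : List (List String)) (n m : Int) :
    ((PySem.List.pyRange 0 n 1).foldl (fun s i =>
      (PySem.List.pyRange 0 m 1).foldl (fun s j => PySem.Set.add s (pvCell room i j)) s)
      PySem.Set.empty : List String).Nodup := by
  apply pv_foldl_nodup
  · intro s i hs
    apply pv_foldl_nodup
    · intro s j hs; apply PySem.Set.nodup_add; exact hs
    · exact hs
  · exact List.nodup_nil

-- what pvTouches means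
theorem pvTouches_iff (room : List (List String)) (n m : Int) (c x : String) :
    pvTouches room n m c x = true ↔
      ∃ i, (0 ≤ i ∧ i < n) ∧ ∃ j, (0 ≤ j ∧ j < m) ∧ pvCell room i j = x ∧
        ∃ pq ∈ ([((i:Int)-1, j), (i+1, j), (i, j-1), (i, j+1)] : List (Int × Int)),
          (0 ≤ pq.1 ∧ pq.1 < n ∧ 0 ≤ pq.2 ∧ pq.2 < m) ∧ pvCell room pq.1 pq.2 = c := by
  simp [pvTouches, pvNeighborsC, List.any_eq_true,
    PySem.List.mem_pyRange_one, and_assoc]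

-- the colour-centred test agrees with A's neighbour collection, for y ≠ c
theorem pv_color_equiv (room : List (List String)) (n m : Int) (c y : String) (hyc : y ≠ c) :
    pvTouches room n m c y = true ↔
      ∃ i, (0 ≤ i ∧ i < n) ∧ ∃ j, (0 ≤ j ∧ j < m) ∧ pvQA room n m c i j y := by
  rw [pvTouches_iff]
  constructor
  · rintro ⟨i, hi, j, hj, hcell, pq, hpq, hrange, hc⟩
    -- the c-cell is pq; (i,j) is its opposite-direction neighbour carrying value y
    simp only [List.mem_cons, List.not_mem_nil, or_false] at hpq
    rcases hpq with h | h | h | h <;> subst h <;> simp only at hrange ⊢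
    · -- pq = (i-1, j): (i,j) is the DOWN neighbour of (i-1,j)
      exact ⟨i-1, ⟨hrange.1, hrange.2.1⟩, j, hj,
        hc, Or.inr (Or.inl ⟨by omega, by rw [show i-1+1 = i by omega, hcell]; exact hyc ∘ Eq.symm ∘ Eq.symm, by rw [show i-1+1 = i by omega, hcell]⟩)⟩
    · -- pq = (i+1, j): (i,j) is the UP neighbour of (i+1,j)
      exact ⟨i+1, ⟨by omega, hrange.2.1⟩, j, hj,
        hc, Or.inl ⟨by omega, by rw [show i+1-1 = i by omega, hcell]; exact hyc, by rw [show i+1-1 = i by omega, hcell]⟩⟩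
    · -- pq = (i, j-1): (i,j) is the RIGHT neighbour of (i,j-1)
      exact ⟨i, hi, j-1, ⟨hrange.2.2.1, hrange.2.2.2⟩,
        hc, Or.inr (Or.inr (Or.inr ⟨by omega, by rw [show j-1+1 = j by omega, hcell]; exact hyc, by rw [show j-1+1 = j by omega, hcell]⟩))⟩
    · -- pq = (i, j+1): (i,j) is the LEFT neighbour of (i,j+1)
      exact ⟨i, hi, j+1, ⟨by omega, hrange.2.2.2⟩,
        hc, Or.inr (Or.inr (Or.inl ⟨by omega, by rw [show j+1-1 = j by omega, hcell]; exact hyc, by rw [show j+1-1 = j by omega, hcell]⟩))⟩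
  · rintro ⟨i, hi, j, hj, hc, hq⟩
    rcases hq with ⟨hgt, hnc, hy⟩ | ⟨hlt, hnc, hy⟩ | ⟨hgt, hnc, hy⟩ | ⟨hlt, hnc, hy⟩
    · -- y sits at (i-1,j); its down neighbour (i,j) is the c-cell
      refine ⟨i-1, ⟨by omega, by omega⟩, j, hj, hy.symm, (i-1+1, j), by simp, ?_, ?_⟩
      · simp only; omega
      · simpa [show i-1+1 = i by omega] using hc
    · -- y sits at (i+1,j); its up neighbour (i,j) is the c-cell
      refine ⟨i+1, ⟨by omega, by omega⟩, j, hj, hy.symm, (i+1-1, j), by simp, ?_, ?_⟩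
      · simp only; omega
      · simpa [show i+1-1 = i by omega] using hc
    · -- y sits at (i,j-1); its right neighbour (i,j) is the c-cell
      refine ⟨i, hi, j-1, ⟨by omega, by omega⟩, hy.symm, (i, j-1+1), by simp, ?_, ?_⟩
      · simp only; omega
      · simpa [show j-1+1 = j by omega] using hc
    · -- y sits at (i,j+1); its left neighbour (i,j) is the c-cell
      refine ⟨i, hi, j+1, ⟨by omega, by omega⟩, hy.symm, (i, j+1-1), by simp, ?_, ?_⟩
      · simp only; omega
      · simpa [show j+1-1 = j by omega] using hc

-- a member of A's set is never c
theorem pvQA_ne_c (room : List (List String)) (n m : Int) (c : String) (i j : Int) (y : String)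
    (h : pvQA room n m c i j y) : y ≠ c := by
  rcases h.2 with ⟨_, hnc, hy⟩ | ⟨_, hnc, hy⟩ | ⟨_, hnc, hy⟩ | ⟨_, hnc, hy⟩ <;> exact hy ▸ hnc

-- counting: removing '.' from a duplicate-free list
theorem pv_count_drop_dot (l : List String) (h : l.Nodup) :
    ((if "." ∈ l then (l.length : Int) - 1 else (l.length : Int))) =
      ((l.filter (fun y => y ≠ ".")).length : Int) := by
  induction l with
  | nil => simp
  | cons a l ih =>
    rw [List.nodup_cons] at h
    have e := ih h.2
    by_cases ha : a = "."
    · subst ha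
      rw [if_neg h.1] at e
      rw [List.filter_cons_of_neg (by simp), if_pos List.mem_cons_self]
      simp only [List.length_cons]
      push_cast at e ⊢
      omega
    · have hane : ("." : String) ≠ a := fun hh => ha hh.symm
      rw [List.filter_cons_of_pos (by simp [ha])]
      simp only [List.length_cons, List.mem_cons, hane, false_or]
      by_cases hm : "." ∈ l
      · rw [if_pos hm] at e ⊢
        push_cast at e ⊢
        omega
      · rw [if_neg hm] at e ⊢
        push_cast at e ⊢
        omega

-- assembling: A's '.'-corrected size equals B's count over the palette
theorem pv_assemble (LA LB : List String) (p : String → Bool) (hA : LA.Nodup) (hB : LB.Nodup)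
    (hm : ∀ y, (y ∈ LB ∧ p y = true) ↔ (y ≠ "." ∧ y ∈ LA)) :
    (if "." ∈ LA then (LA.length : Int) - 1 else (LA.length : Int)) = ((LB.countP p : Nat) : Int) := by
  rw [pv_count_drop_dot LA hA, List.countP_eq_length_filter]
  have hperm : (LB.filter p).Perm (LA.filter (fun y => y ≠ ".")) := by
    rw [List.perm_ext_iff_of_nodup (hB.filter _) (hA.filter _)]
    intro y
    simp only [List.mem_filter, decide_eq_true_eq, ne_eq]
    rw [show (y ∈ LB ∧ p y = true) ↔ (¬ y = "." ∧ y ∈ LA) from hm y]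
    tauto
  rw [hperm.length_eq]

-- ===== VERDICT (by name: the statement is the Claim_ definition above) =====
theorem solve_editorial_spec : Claim_equal_solve_editorial := by
  intro room n m c _hdom _hpre
  unfold Spec_solve_editorial solve_editorial solve_editorial_alt
  refine pv_assemble _ _ _ (pvA_nodup room n m c) (pvPal_nodup room n m) ?_
  intro y
  rw [pvA_mem room n m c y]
  constructor
  · rintro ⟨hpal, hp⟩
    simp only [Bool.and_eq_true, Bool.not_eq_true', beq_eq_false_iff_ne, ne_eq] at hp
    obtain ⟨⟨hyc, hyd⟩, ht⟩ := hp
    exact ⟨hyd, (pv_color_equiv room n m c y hyc).mp ht⟩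
  · rintro ⟨hyd, hex⟩
    obtain ⟨i, hi, j, hj, hq⟩ := hex
    have hyc : y ≠ c := pvQA_ne_c room n m c i j y hq
    constructor
    · -- y appears in the grid (at the neighbour cell QA names), hence in the palette
      rw [pvPal_mem room n m y]
      rcases hq.2 with ⟨hgt, _, hy⟩ | ⟨hlt, _, hy⟩ | ⟨hgt, _, hy⟩ | ⟨hlt, _, hy⟩
      · exact ⟨i-1, ⟨by omega, by omega⟩, j, hj, hy⟩
      · exact ⟨i+1, ⟨by omega, by omega⟩, j, hj, hy⟩
      · exact ⟨i, hi, j-1, ⟨by omega, by omega⟩, hy⟩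
      · exact ⟨i, hi, j+1, ⟨by omega, by omega⟩, hy⟩
    · simp only [Bool.and_eq_true, Bool.not_eq_true', beq_eq_false_iff_ne, ne_eq]
      exact ⟨⟨hyc, hyd⟩, (pv_color_equiv room n m c y hyc).mpr ⟨i, hi, j, hj, hq⟩⟩
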